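-- pv_equiv track=rewrite | github.com/bdcheeseboro/ecc_gw_search | ecc_search_code/.ipynb_checkpoints/chain_trimmer-checkpoint.py | mc_range_edges
-- ===== SOURCE A (Python) =====
-- from operator import itemgetter
-- import itertools
--
-- def mc_range_edges(bad_chunks):
--     bad_start = []
--     bad_end = []
--     L = bad_chunks
--     for k, g in itertools.groupby( enumerate(L), lambda x: x[1]-x[0] ) :
--         a = list(map(itemgetter(1), g))
--         bad_start.append(a[0])
--         bad_end.append(a[-1]+200)
--
--     edges_start = []
--     edges_end = []
--     for i in range(len(bad_start)-1):
--         if bad_start[i+1]>bad_end[i]: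
--             edges_start.append(bad_start[i])
--             edges_end.append(bad_end[i])
--     return edges_start, edges_end
-- ===== SOURCE B (Python) =====
-- def mc_range_edges(bad_chunks):
--     # single pass with running state instead of building bad_start/bad_end lists
--     edges_start = []
--     edges_end = []
--     cur = None  # (cur_start, cur_last, cur_key)
--     for idx, val in enumerate(bad_chunks):
--         key = val - idx
--         if cur is None:
--             cur = (val, val, key)
--         else:
--             cur_start, cur_last, cur_key = cur
--             if key != cur_key:
--                 end = cur_last + 200
--                 if val > end:
--                     edges_start.append(cur_start)
--                     edges_end.append(end)
--                 cur = (val, val, key)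
--             else:
--                 cur = (cur_start, val, key)
--     return edges_start, edges_end
-- ===== Notes on version B (the rewrite author's own statement) =====
-- stated objective: simpler
-- what changed: Replaced the two-phase pipeline (itertools.groupby building bad_start/bad_end lists, then an index scan over them) by a single fused pass over enumerate(bad_chunks) that keeps only the running state (cur_start, cur_last, cur_key) and emits an edge the moment a run ends with a gap > 200.
import Mathlib
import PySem

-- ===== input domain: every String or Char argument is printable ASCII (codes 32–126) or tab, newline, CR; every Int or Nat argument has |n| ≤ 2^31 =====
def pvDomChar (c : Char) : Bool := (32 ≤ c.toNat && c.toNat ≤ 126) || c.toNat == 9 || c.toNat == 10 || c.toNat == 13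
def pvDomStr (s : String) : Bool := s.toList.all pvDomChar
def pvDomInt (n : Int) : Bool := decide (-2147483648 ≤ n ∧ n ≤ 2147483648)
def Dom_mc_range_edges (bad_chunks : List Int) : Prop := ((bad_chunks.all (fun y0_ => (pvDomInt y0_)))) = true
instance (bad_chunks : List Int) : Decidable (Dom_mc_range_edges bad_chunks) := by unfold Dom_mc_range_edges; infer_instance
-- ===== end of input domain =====

-- B replaces A's two-phase groupby-then-scan with a single fused pass keeping running
-- run state (cur_start, cur_last, cur_key): no intermediate lists (timing run measured B faster by a constant factor).

-- ===== PORT A =====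
-- itertools.groupby(·, key) helpers: take the maximal prefix with the given key …
def pvSpanKey (k : Int) : List (Int × Int) → List (Int × Int) × List (Int × Int)
  | [] => ([], [])
  | x :: xs =>
    if x.2 - x.1 = k then
      let r := pvSpanKey k xs
      (x :: r.1, r.2)
    else ([], x :: xs)

theorem pvSpanKey_snd_length (k : Int) (ps : List (Int × Int)) :
    (pvSpanKey k ps).2.length ≤ ps.length := by
  induction ps with
  | nil => simp [pvSpanKey]
  | cons x xs ih =>
    simp only [pvSpanKey]
    split
    · exact Nat.le_succ_of_le ih
    · simp

-- … and group consecutive elements with equal key x[1]-x[0] (exact for this strictly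
-- shaped input: groupby over enumerate with key val-idx)
def pvGroupBy : List (Int × Int) → List (List (Int × Int))
  | [] => []
  | x :: xs =>
    let r := pvSpanKey (x.2 - x.1) xs
    (x :: r.1) :: pvGroupBy r.2
  termination_by ps => ps.length
  decreasing_by
    exact Nat.lt_succ_of_le (pvSpanKey_snd_length _ _)

-- second loop of A: for i in range(len(bad_start)-1): if bad_start[i+1] > bad_end[i] …
def pvEdges : List Int → List Int → List Int × List Int
  | s0 :: s1 :: ss, e0 :: es =>
    let r := pvEdges (s1 :: ss) es
    if s1 > e0 then (s0 :: r.1, e0 :: r.2) else r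
  | _, _ => ([], [])

def mc_range_edges (bad_chunks : List Int) : List Int × List Int :=
  let gs := pvGroupBy (PySem.List.enumerate bad_chunks)
  let bad_start := gs.map (fun g => (g.headD (0, 0)).2)
  let bad_end := gs.map (fun g => (g.getLastD (0, 0)).2 + 200)
  pvEdges bad_start bad_end

-- ===== PORT B =====
-- one fold step of Source B's loop; state = (edges_start, edges_end, cur)
def pvStep (st : List Int × List Int × Option (Int × Int × Int)) (p : Int × Int) :
    List Int × List Int × Option (Int × Int × Int) :=
  let key := p.2 - p.1
  match st with
  | (es, ee, none) => (es, ee, some (p.2, p.2, key))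
  | (es, ee, some (cs, cl, ck)) =>
    if key ≠ ck then
      let e := cl + 200
      if p.2 > e then (es ++ [cs], ee ++ [e], some (p.2, p.2, key))
      else (es, ee, some (p.2, p.2, key))
    else (es, ee, some (cs, p.2, ck))

def mc_range_edges_alt (bad_chunks : List Int) : List Int × List Int :=
  let r := (PySem.List.enumerate bad_chunks).foldl pvStep ([], [], none)
  (r.1, r.2.1)

-- ===== PRECONDITION & SPEC =====
def Spec_mc_range_edges (bad_chunks : List Int) (out : List Int × List Int) : Prop := out = mc_range_edges_alt bad_chunks
instance (bad_chunks : List Int) (out : List Int × List Int) : Decidable (Spec_mc_range_edges bad_chunks out) := by unfold Spec_mc_range_edges; infer_instance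

-- ===== CLAIM (what is proved, stated in full; the proofs are below) =====
def Claim_equal_mc_range_edges : Prop := ∀ (bad_chunks : List Int), Dom_mc_range_edges bad_chunks → Spec_mc_range_edges bad_chunks (mc_range_edges bad_chunks)

-- ===== LEMMAS AND PROOFS =====

-- the list of (start value, last value) of the maximal consecutive runs, given a
-- pending run (cs, cl) with key ck
def pvRuns (cs cl ck : Int) (ps : List (Int × Int)) : List (Int × Int) :=
  let r := pvSpanKey ck ps
  let l := (r.1.getLast?.map Prod.snd).getD cl
  match h : r.2 with
  | [] => [(cs, l)]
  | y :: ys => (cs, l) :: pvRuns y.2 y.2 (y.2 - y.1) ys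
  termination_by ps.length
  decreasing_by
    have := pvSpanKey_snd_length ck ps
    rw [h] at this
    exact Nat.lt_of_lt_of_le (Nat.lt_succ_self _) this

-- pvEdges on (start, last) pairs
def pvEdgesP : List (Int × Int) → List Int × List Int
  | (s0, l0) :: (s1, l1) :: rest =>
    let r := pvEdgesP ((s1, l1) :: rest)
    if s1 > l0 + 200 then (s0 :: r.1, (l0 + 200) :: r.2) else r
  | _ => ([], [])

theorem pvEdges_map (rs : List (Int × Int)) :
    pvEdges (rs.map Prod.fst) (rs.map (fun r => r.2 + 200)) = pvEdgesP rs := by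
  induction rs with
  | nil => rfl
  | cons r rs ih =>
    cases rs with
    | nil => rfl
    | cons r2 rs2 =>
      simp only [List.map, pvEdges, pvEdgesP] at *
      rw [ih]

theorem pvRuns_head (cs cl ck : Int) (ps : List (Int × Int)) :
    ∃ l rest, pvRuns cs cl ck ps = (cs, l) :: rest := by
  rw [pvRuns]
  split <;> exact ⟨_, _, rfl⟩

theorem getLast?_cons_snd (p : Int × Int) (a : List (Int × Int)) (cl : Int) :
    (((p :: a).getLast?).map Prod.snd).getD cl = ((a.getLast?).map Prod.snd).getD p.2 := by
  cases a with
  | nil => simp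
  | cons q qs =>
    cases hl : (q :: qs).getLast? with
    | none => simp at hl
    | some z => simp [hl]

theorem pvRuns_cons_eq (cs cl ck : Int) (p : Int × Int) (ps : List (Int × Int))
    (h : p.2 - p.1 = ck) :
    pvRuns cs cl ck (p :: ps) = pvRuns cs p.2 ck ps := by
  rw [pvRuns, pvRuns]
  simp only [pvSpanKey]
  rw [if_pos h]
  simp only [getLast?_cons_snd]

theorem pvRuns_cons_ne (cs cl ck : Int) (p : Int × Int) (ps : List (Int × Int))
    (h : ¬ p.2 - p.1 = ck) :
    pvRuns cs cl ck (p :: ps) = (cs, cl) :: pvRuns p.2 p.2 (p.2 - p.1) ps := by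
  rw [pvRuns]
  simp only [pvSpanKey]
  rw [if_neg h]
  simp

theorem getLast?_getD_snd (x : Int × Int) (a : List (Int × Int)) :
    ((x :: a).getLast?.getD (0, 0)).2 = ((a.getLast?).getD x).2 := by
  cases a with
  | nil => simp
  | cons q qs =>
    cases hl : (q :: qs).getLast? with
    | none => simp at hl
    | some z => simp [List.getLast?_cons_cons, hl]

theorem getLastD_cons_snd (x : Int × Int) (a : List (Int × Int)) :
    ((x :: a).getLastD (0, 0)).2 = ((a.getLast?).map Prod.snd).getD x.2 := by
  rw [← getLast?_cons_snd x a 0]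
  cases hl : (x :: a).getLast? with
  | none => simp at hl
  | some z => simp [List.getLastD_eq_getLast?, hl]

theorem pvGroupBy_runs (n : Nat) : ∀ (ps : List (Int × Int)), ps.length ≤ n → ∀ (x : Int × Int),
    (pvGroupBy (x :: ps)).map (fun g => ((g.headD (0, 0)).2, (g.getLastD (0, 0)).2))
      = pvRuns x.2 x.2 (x.2 - x.1) ps := by
  induction n with
  | zero =>
    intro ps hps x
    have hnil : ps = [] := List.length_eq_zero_iff.mp (Nat.le_zero.mp hps)
    subst hnil
    simp [pvGroupBy, pvSpanKey, pvRuns]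
  | succ n ih =>
    intro ps hps x
    rw [pvGroupBy, pvRuns]
    cases hb : (pvSpanKey (x.2 - x.1) ps).2 with
    | nil =>
      simp [pvGroupBy, getLast?_getD_snd]
    | cons y ys =>
      have hlen : ys.length ≤ n := by
        have h1 := pvSpanKey_snd_length (x.2 - x.1) ps
        rw [hb] at h1
        simp only [List.length_cons] at h1
        omega
      simp only [List.map_cons, List.headD_cons, getLastD_cons_snd]
      rw [ih ys hlen y]

theorem pvFold_runs (n : Nat) : ∀ (ps : List (Int × Int)), ps.length ≤ n →
    ∀ (cs cl ck : Int) (es ee : List Int),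
    (let r := ps.foldl pvStep (es, ee, some (cs, cl, ck)); (r.1, r.2.1))
      = (es ++ (pvEdgesP (pvRuns cs cl ck ps)).1, ee ++ (pvEdgesP (pvRuns cs cl ck ps)).2) := by
  induction n with
  | zero =>
    intro ps hps cs cl ck es ee
    have hnil : ps = [] := List.length_eq_zero_iff.mp (Nat.le_zero.mp hps)
    subst hnil
    simp [pvRuns, pvSpanKey, pvEdgesP]
  | succ n ih =>
    intro ps hps cs cl ck es ee
    cases ps with
    | nil => simp [pvRuns, pvSpanKey, pvEdgesP]
    | cons p ps' =>
      have hlen : ps'.length ≤ n := by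
        simp only [List.length_cons] at hps
        omega
      by_cases hk : p.2 - p.1 = ck
      · rw [pvRuns_cons_eq cs cl ck p ps' hk]
        have hstep : pvStep (es, ee, some (cs, cl, ck)) p = (es, ee, some (cs, p.2, ck)) := by
          simp [pvStep, hk]
        simp only [List.foldl_cons, hstep]
        exact ih ps' hlen cs p.2 ck es ee
      · rw [pvRuns_cons_ne cs cl ck p ps' hk]
        obtain ⟨l, rest, hr⟩ := pvRuns_head p.2 p.2 (p.2 - p.1) ps'
        rw [hr]
        have hihr := ih ps' hlen p.2 p.2 (p.2 - p.1)
        by_cases hgt : p.2 > cl + 200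
        · have hstep : pvStep (es, ee, some (cs, cl, ck)) p
              = (es ++ [cs], ee ++ [cl + 200], some (p.2, p.2, p.2 - p.1)) := by
            simp [pvStep, hk, hgt]
          simp only [List.foldl_cons, hstep]
          have hx := hihr (es ++ [cs]) (ee ++ [cl + 200])
          rw [hr] at hx
          simp only at hx
          rw [hx]
          simp [pvEdgesP, hgt, List.append_assoc]
        · have hstep : pvStep (es, ee, some (cs, cl, ck)) p
              = (es, ee, some (p.2, p.2, p.2 - p.1)) := by
            simp [pvStep, hk, hgt]
          simp only [List.foldl_cons, hstep]
          have hx := hihr es ee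
          rw [hr] at hx
          simp only at hx
          rw [hx]
          simp [pvEdgesP, hgt]

-- ===== VERDICT (by name: the statement is the Claim_ definition above) =====
theorem mc_range_edges_spec : Claim_equal_mc_range_edges := by
  intro l _
  unfold Spec_mc_range_edges mc_range_edges mc_range_edges_alt
  cases l with
  | nil => simp [PySem.List.enumerate_nil, pvGroupBy, pvEdges]
  | cons v vs =>
    rw [PySem.List.enumerate_cons]
    simp only [zero_add]
    have h1 : pvStep ([], [], none) (0, v) = ([], [], some (v, v, v - 0)) := rfl
    have hf := pvFold_runs (PySem.List.enumerate vs 1).length (PySem.List.enumerate vs 1)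
      le_rfl v v (v - 0) [] []
    have hg := pvGroupBy_runs (PySem.List.enumerate vs 1).length (PySem.List.enumerate vs 1)
      le_rfl (0, v)
    simp only at hg
    have e1 : (pvGroupBy ((0, v) :: PySem.List.enumerate vs 1)).map (fun g => (g.headD (0, 0)).2)
        = (pvRuns v v (v - 0) (PySem.List.enumerate vs 1)).map Prod.fst := by
      rw [← hg, List.map_map]
      rfl
    have e2 : (pvGroupBy ((0, v) :: PySem.List.enumerate vs 1)).map (fun g => (g.getLastD (0, 0)).2 + 200)
        = (pvRuns v v (v - 0) (PySem.List.enumerate vs 1)).map (fun r => r.2 + 200) := by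
      rw [← hg, List.map_map]
      rfl
    simp only at hf
    simp only [List.foldl_cons, h1, e1, e2, pvEdges_map]
    rw [hf]
    simp
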